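-- pv_equiv track=rewrite | github.com/zahias/advising | v2/backend/app/services/progress_processing.py | extract_primary_grade
-- ===== SOURCE A (Python) =====
-- GRADE_ORDER: list[str] = [
--     "CR",
--     "A+", "A", "A-",
--     "B+", "B", "B-",
--     "C+", "C", "C-",
--     "D+", "D", "D-",
-- ]
--
-- def extract_primary_grade(value: str) -> str:
--     """
--     Pick the single highest-priority entry from a multi-attempt value string
--     (CR first, then GRADE_ORDER order).
--     """
--     if not isinstance(value, str):
--         return str(value)
--
--     entries = [e.strip() for e in value.split(",") if e.strip()]
--     parsed: list[dict[str, str]] = []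
--     for entry in entries:
--         if "|" in entry:
--             g, c = entry.split("|", 1)
--             parsed.append({"grade": g.strip().upper(), "credit": c.strip(), "original": entry})
--         else:
--             parsed.append({"grade": entry.strip().upper(), "credit": "", "original": entry})
--
--     for entry in parsed:
--         if entry["grade"] == "CR":
--             return entry["original"]
--
--     for grade in GRADE_ORDER:
--         for entry in parsed:
--             if entry["grade"] == grade:
--                 return entry["original"]
--
--     for entry in parsed:
--         credit = entry["credit"].strip()
--         if credit:
--             try:
--                 if int(credit) > 0:
--                     return entry["original"]
--             except ValueError:
--                 if credit.upper() == "PASS":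
--                     return entry["original"]
--
--     return parsed[0]["original"] if parsed else ""
-- ===== SOURCE B (Python) =====
-- GRADE_ORDER: list[str] = [
--     "CR",
--     "A+", "A", "A-",
--     "B+", "B", "B-",
--     "C+", "C", "C-",
--     "D+", "D", "D-",
-- ]
--
-- PRIORITY: dict[str, int] = {g: i for i, g in enumerate(GRADE_ORDER)}
--
--
-- def _parse(entry: str) -> tuple[str, str, str]:
--     if "|" in entry:
--         g, c = entry.split("|", 1)
--         return (g.strip().upper(), c.strip(), entry)
--     return (entry.strip().upper(), "", entry)
--
--
-- def _credit_ok(credit: str, orig: str):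
--     if credit:
--         try:
--             if int(credit) > 0:
--                 return orig
--         except ValueError:
--             if credit.upper() == "PASS":
--                 return orig
--     return None
--
--
-- def extract_primary_grade(value: str) -> str:
--     if not isinstance(value, str):
--         return str(value)
--
--     parsed = [_parse(e) for e in map(str.strip, value.split(",")) if e]
--
--     # single pass: keep the entry with the smallest priority rank; first wins ties
--     best = None
--     for g, _, orig in parsed:
--         r = PRIORITY.get(g)
--         if r is not None and (best is None or r < best[0]):
--             best = (r, orig)
--     if best is not None:
--         return best[1]
--
--     best = next(filter(None, (_credit_ok(c, o) for _, c, o in parsed)), None)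
--     if best is not None:
--         return best
--
--     return parsed[0][2] if parsed else ""
-- ===== Notes on version B (the rewrite author's own statement) =====
-- stated objective: idiomatic
-- what changed: Replaces A's separate CR pass and the GRADE_ORDER x parsed nested scan with a precomputed grade-to-rank dict and a single fold over the parsed entries keeping the entry of strictly smallest rank (first wins ties); the credit fallback becomes a generator-style first-match search.
import Mathlib
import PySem

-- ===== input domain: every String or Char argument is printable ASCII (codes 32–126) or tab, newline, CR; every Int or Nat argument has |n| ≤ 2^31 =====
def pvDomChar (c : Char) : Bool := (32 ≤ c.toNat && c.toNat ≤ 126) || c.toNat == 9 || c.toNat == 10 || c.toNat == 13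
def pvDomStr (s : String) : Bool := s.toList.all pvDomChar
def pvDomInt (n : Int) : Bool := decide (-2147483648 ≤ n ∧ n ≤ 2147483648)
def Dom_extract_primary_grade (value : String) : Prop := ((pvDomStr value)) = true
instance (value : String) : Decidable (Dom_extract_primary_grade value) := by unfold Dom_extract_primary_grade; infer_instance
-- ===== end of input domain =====

-- B replaces A's CR pass plus the GRADE_ORDER × parsed nested scan by one fold over parsed
-- keeping the entry of smallest precomputed priority rank (idiomatic; same asymptotic cost).

-- ===== PORT A =====
def GRADE_ORDER : List String :=
  ["CR", "A+", "A", "A-", "B+", "B", "B-", "C+", "C", "C-", "D+", "D", "D-"]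

-- for entry in parsed: if entry["grade"] == "CR": return entry["original"]
def crLoop : List (String × String × String) → Option String
  | [] => none
  | e :: rest => if e.1 == "CR" then some e.2.2 else crLoop rest

-- inner 'for entry in parsed: if entry["grade"] == grade: return entry["original"]'
def innerScan (g : String) : List (String × String × String) → Option String
  | [] => none
  | e :: rest => if e.1 == g then some e.2.2 else innerScan g rest

-- outer 'for grade in GRADE_ORDER:'
def gradeScan (parsed : List (String × String × String)) : List String → Option String
  | [] => none
  | g :: gs =>
    match innerScan g parsed with
    | some o => some o
    | none => gradeScan parsed gs

-- final credit fallback loop of A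
def creditLoopA : List (String × String × String) → Option String
  | [] => none
  | e :: rest =>
    let credit := PySem.Str.strip e.2.1
    if credit ≠ "" then
      match PySem.Int.ofStr? credit with
      | some n => if n > 0 then some e.2.2 else creditLoopA rest
      | none => if PySem.Str.upper credit == "PASS" then some e.2.2 else creditLoopA rest
    else creditLoopA rest

def extract_primary_grade (value : String) : String :=
  let entries := ((PySem.Str.split? value ",").getD []).filterMap
    (fun e => if PySem.Str.strip e ≠ "" then some (PySem.Str.strip e) else none)
  let parsed := entries.foldl (fun parsed entry =>
    if PySem.Str.isIn "|" entry then
      let parts := (PySem.Str.splitMax? entry "|" 1).getD []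
      parsed ++ [(PySem.Str.upper (PySem.Str.strip (parts.getD 0 "")),
                  PySem.Str.strip (parts.getD 1 ""), entry)]
    else
      parsed ++ [(PySem.Str.upper (PySem.Str.strip entry), "", entry)]) []
  match crLoop parsed with
  | some o => o
  | none =>
    match gradeScan parsed GRADE_ORDER with
    | some o => o
    | none =>
      match creditLoopA parsed with
      | some o => o
      | none =>
        match parsed with
        | [] => ""
        | e :: _ => e.2.2

-- ===== PORT B =====
def GRADE_ORDER_B : List String :=
  ["CR", "A+", "A", "A-", "B+", "B", "B-", "C+", "C", "C-", "D+", "D", "D-"]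

-- PRIORITY = {g: i for i, g in enumerate(GRADE_ORDER)}
def PRIORITY : PySem.Dict String Int :=
  (PySem.List.enumerate GRADE_ORDER_B 0).foldl (fun d p => d.insert p.2 p.1) PySem.Dict.empty

def parseB (entry : String) : String × String × String :=
  if PySem.Str.isIn "|" entry then
    let parts := (PySem.Str.splitMax? entry "|" 1).getD []
    (PySem.Str.upper (PySem.Str.strip (parts.getD 0 "")), PySem.Str.strip (parts.getD 1 ""), entry)
  else
    (PySem.Str.upper (PySem.Str.strip entry), "", entry)

-- one step of B's single best-keeping pass (first entry wins ties: strict <)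
def stepB (b : Option (Int × String)) (e : String × String × String) : Option (Int × String) :=
  match PRIORITY.get? e.1 with
  | none => b
  | some r =>
    match b with
    | none => some (r, e.2.2)
    | some (r0, _) => if r < r0 then some (r, e.2.2) else b

-- _credit_ok
def creditB (e : String × String × String) : Option String :=
  if e.2.1 ≠ "" then
    match PySem.Int.ofStr? e.2.1 with
    | some n => if n > 0 then some e.2.2 else none
    | none => if PySem.Str.upper e.2.1 == "PASS" then some e.2.2 else none
  else none

def extract_primary_grade_alt (value : String) : String :=
  let parsed := ((((PySem.Str.split? value ",").getD []).map PySem.Str.strip).filter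
    (fun e => !(e == ""))).map parseB
  match parsed.foldl stepB none with
  | some (_, o) => o
  | none =>
    match parsed.findSome? creditB with
    | some o => o
    | none =>
      match parsed with
      | [] => ""
      | e :: _ => e.2.2

-- ===== PRECONDITION & SPEC =====
def Spec_extract_primary_grade (value : String) (out : String) : Prop := out = extract_primary_grade_alt value
instance (value : String) (out : String) : Decidable (Spec_extract_primary_grade value out) := by unfold Spec_extract_primary_grade; infer_instance

-- ===== CLAIM (what is proved, stated in full; the proofs are below) =====
def Claim_equal_extract_primary_grade : Prop := ∀ (value : String), Dom_extract_primary_grade value → Spec_extract_primary_grade value (extract_primary_grade value)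

-- ===== LEMMAS AND PROOFS =====

-- rank of a grade inside a suffix of the grade list, counting from k
def rankFrom (k : Int) : List String → String → Option Int
  | [], _ => none
  | x :: xs, g => if x == g then some k else rankFrom (k + 1) xs g

-- gradeScan with the rank of the grade that matched
def gsR (L : List (String × String × String)) (k : Int) : List String → Option (Int × String)
  | [] => none
  | g :: gs =>
    match innerScan g L with
    | some o => some (k, o)
    | none => gsR L (k + 1) gs

-- keep the left candidate unless the right one has strictly smaller rank
def mergeO : Option (Int × String) → Option (Int × String) → Option (Int × String)
  | none, y => y
  | some x, none => some x
  | some x, some y => if y.1 < x.1 then some y else some x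

theorem mergeO_none_right (x : Option (Int × String)) : mergeO x none = x := by
  cases x <;> rfl

theorem mergeO_assoc (a b c : Option (Int × String)) :
    mergeO (mergeO a b) c = mergeO a (mergeO b c) := by
  cases a <;> cases b <;> cases c <;> simp only [mergeO] <;>
    split_ifs <;> simp only [mergeO] <;> split_ifs <;>
    first | rfl | omega

theorem rankFrom_bound (g : String) (gs : List String) (k r : Int)
    (h : rankFrom k gs g = some r) : k ≤ r := by
  induction gs generalizing k with
  | nil => simp [rankFrom] at h
  | cons x xs ih =>
    simp only [rankFrom] at h
    split at h
    · cases h; omega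
    · have := ih (k + 1) h; omega

theorem gsR_bound (L : List (String × String × String)) (gs : List String) (k : Int)
    (p : Int × String) (h : gsR L k gs = some p) : k ≤ p.1 := by
  induction gs generalizing k with
  | nil => simp [gsR] at h
  | cons g gs ih =>
    simp only [gsR] at h
    split at h
    · cases h; simp
    · have := ih (k + 1) h; omega

theorem gsR_nil (gs : List String) (k : Int) : gsR [] k gs = none := by
  induction gs generalizing k with
  | nil => rfl
  | cons g gs ih => simp [gsR, innerScan, ih]

theorem gradeScan_eq_gsR (L : List (String × String × String)) (gs : List String) (k : Int) :
    gradeScan L gs = (gsR L k gs).map (·.2) := by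
  induction gs generalizing k with
  | nil => rfl
  | cons g gs ih =>
    simp only [gradeScan, gsR]
    cases innerScan g L with
    | some o => rfl
    | none => simpa using ih (k + 1)

theorem gsR_cons (e : String × String × String) (L : List (String × String × String))
    (gs : List String) (k : Int) :
    gsR (e :: L) k gs = mergeO ((rankFrom k gs e.1).map (fun r => (r, e.2.2))) (gsR L k gs) := by
  induction gs generalizing k with
  | nil => rfl
  | cons g gs ih =>
    simp only [gsR, rankFrom, innerScan]
    by_cases hg : e.1 = g
    · have hg' : (g == e.1) = true := by simp [hg]
      simp only [hg, beq_self_eq_true, if_true, Option.map_some]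
      cases hL : innerScan g L with
      | some o => simp [mergeO]
      | none =>
        cases hR : gsR L (k + 1) gs with
        | none => simp [mergeO]
        | some p =>
          have hb := gsR_bound L gs (k + 1) p hR
          have hlt : ¬ (p.1 < k) := by omega
          simp [mergeO, hlt]
    · have hg1 : (e.1 == g) = false := by simp [hg]
      have hg2 : (g == e.1) = false := by simp [Ne.symm hg]
      simp only [hg1, hg2, Bool.false_eq_true, if_false]
      cases hL : innerScan g L with
      | some o =>
        simp only []
        cases hF : rankFrom (k + 1) gs e.1 with
        | none => simp [mergeO]
        | some r =>
          have hb := rankFrom_bound e.1 gs (k + 1) r hF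
          have : k < r := by omega
          simp [mergeO, this]
      | none => simpa using ih (k + 1)

-- PRIORITY.get? is lookup by rank in the grade list
theorem priority_get (g : String) : PRIORITY.get? g = rankFrom 0 GRADE_ORDER_B g := by
  have hP : PRIORITY = PySem.Dict.mk
      [("CR", 0), ("A+", 1), ("A", 2), ("A-", 3), ("B+", 4), ("B", 5), ("B-", 6),
       ("C+", 7), ("C", 8), ("C-", 9), ("D+", 10), ("D", 11), ("D-", 12)] := by decide
  rw [hP]
  simp only [GRADE_ORDER_B, rankFrom, PySem.Dict.get?_mk_cons]
  norm_num [PySem.Dict.get?]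

theorem stepB_eq (b : Option (Int × String)) (e : String × String × String) :
    stepB b e = mergeO b ((rankFrom 0 GRADE_ORDER_B e.1).map (fun r => (r, e.2.2))) := by
  simp only [stepB, priority_get]
  cases rankFrom 0 GRADE_ORDER_B e.1 with
  | none => simp [mergeO_none_right]
  | some r =>
    cases b with
    | none => rfl
    | some p => rfl

theorem foldl_stepB (L : List (String × String × String)) (b : Option (Int × String)) :
    L.foldl stepB b = mergeO b (gsR L 0 GRADE_ORDER_B) := by
  induction L generalizing b with
  | nil => simp [gsR_nil, mergeO_none_right]
  | cons e L ih =>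
    simp only [List.foldl_cons, ih, stepB_eq]
    rw [mergeO_assoc]
    congr 1
    exact (gsR_cons e L GRADE_ORDER_B 0).symm

theorem crLoop_eq (L : List (String × String × String)) : crLoop L = innerScan "CR" L := by
  induction L with
  | nil => rfl
  | cons e L ih => simp only [crLoop, innerScan, ih]

-- Python's strip is idempotent
theorem strip_strip (s : String) :
    PySem.Str.strip (PySem.Str.strip s) = PySem.Str.strip s := by
  simp only [PySem.Str.strip, PySem.Chars.strip, PySem.Chars.lstrip, PySem.Chars.rstrip,
    String.toList_ofList]
  generalize s.toList = l
  set p := PySem.Chars.isspace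
  -- t := dropWhile p l has a head failing p (if nonempty)
  rcases h2 : ((l.dropWhile p).reverse.dropWhile p).reverse with _ | ⟨c, cs⟩
  · simp
  · -- c :: cs is a nonempty prefix of dropWhile p l, so ¬ p c
    have hpre : c :: cs <+: l.dropWhile p := by
      rw [← l.dropWhile p |>.reverse_reverse, ← h2]
      exact List.reverse_prefix.mpr (List.dropWhile_suffix p)
    have hc : ¬ p c := by
      rcases hd : l.dropWhile p with _ | ⟨x, xs⟩
      · rw [hd] at hpre; simp at hpre
      · have hx : ¬ p x := by
          have := List.head?_dropWhile_not p l
          rw [hd] at this; simp at this; simpa using this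
        obtain ⟨t, ht⟩ := hpre
        rw [hd] at ht
        have : c = x := by
          cases ht; rfl
        rwa [this]
    have hdw : (c :: cs).dropWhile p = c :: cs := by
      simp [hc]
    have h3 : (c :: cs).reverse = List.dropWhile p (List.dropWhile p l).reverse := by
      rw [← h2, List.reverse_reverse]
    rw [hdw, h3, List.dropWhile_idempotent, ← h3, List.reverse_reverse]

theorem credit_eq (L : List (String × String × String))
    (hc : ∀ e ∈ L, PySem.Str.strip e.2.1 = e.2.1) :
    creditLoopA L = L.findSome? creditB := by
  induction L with
  | nil => rfl
  | cons e L ih =>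
    have he := hc e (List.mem_cons_self ..)
    have ihL := ih (fun x hx => hc x (List.mem_cons_of_mem _ hx))
    simp only [creditLoopA, List.findSome?_cons, creditB, he]
    by_cases h0 : e.2.1 = ""
    · simp [h0, ihL]
    · simp only [h0, ne_eq, not_false_eq_true, if_true]
      cases PySem.Int.ofStr? e.2.1 with
      | some n =>
        by_cases hn : n > 0 <;> simp [hn, ihL]
      | none =>
        by_cases hp : (PySem.Str.upper e.2.1 == "PASS") = true <;> simp [hp, ihL]

-- the two parsing pipelines build the same list
theorem entries_eq (xs : List String) :
    xs.filterMap (fun e => if PySem.Str.strip e ≠ "" then some (PySem.Str.strip e) else none)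
      = (xs.map PySem.Str.strip).filter (fun e => !(e == "")) := by
  induction xs with
  | nil => rfl
  | cons x xs ih =>
    simp only [ne_eq, ite_not] at ih ⊢
    by_cases h : PySem.Str.strip x = "" <;>
      simp [h, ih]

theorem parsed_eq (entries : List String) :
    entries.foldl (fun parsed entry =>
      if PySem.Str.isIn "|" entry then
        let parts := (PySem.Str.splitMax? entry "|" 1).getD []
        parsed ++ [(PySem.Str.upper (PySem.Str.strip (parts.getD 0 "")),
                    PySem.Str.strip (parts.getD 1 ""), entry)]
      else
        parsed ++ [(PySem.Str.upper (PySem.Str.strip entry), "", entry)]) []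
      = entries.map parseB := by
  have hbody : (fun (parsed : List (String × String × String)) (entry : String) =>
      if PySem.Str.isIn "|" entry then
        let parts := (PySem.Str.splitMax? entry "|" 1).getD []
        parsed ++ [(PySem.Str.upper (PySem.Str.strip (parts.getD 0 "")),
                    PySem.Str.strip (parts.getD 1 ""), entry)]
      else
        parsed ++ [(PySem.Str.upper (PySem.Str.strip entry), "", entry)])
      = fun parsed entry => parsed ++ [parseB entry] := by
    funext parsed entry
    simp only [parseB]
    split_ifs <;> rfl
  rw [hbody, PySem.List.foldl_append_singleton_eq_map]
  simp

-- every credit built by the parser is already stripped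
theorem parsed_cred (entries : List String) :
    ∀ e ∈ entries.map parseB, PySem.Str.strip e.2.1 = e.2.1 := by
  intro e he
  rcases List.mem_map.mp he with ⟨x, _, rfl⟩
  simp only [parseB]
  split_ifs
  · exact strip_strip _
  · show PySem.Str.strip "" = ""
    decide

-- the heart: on any parsed list whose credits are stripped, A's staged scans equal B's fold
def runA (L : List (String × String × String)) : String :=
  match crLoop L with
  | some o => o
  | none =>
    match gradeScan L GRADE_ORDER with
    | some o => o
    | none =>
      match creditLoopA L with
      | some o => o
      | none =>
        match L with
        | [] => ""
        | e :: _ => e.2.2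

def runB (L : List (String × String × String)) : String :=
  match L.foldl stepB none with
  | some (_, o) => o
  | none =>
    match L.findSome? creditB with
    | some o => o
    | none =>
      match L with
      | [] => ""
      | e :: _ => e.2.2

theorem main_eq (L : List (String × String × String))
    (hc : ∀ e ∈ L, PySem.Str.strip e.2.1 = e.2.1) :
    runA L = runB L := by
  unfold runA runB
  have hfold : L.foldl stepB none = gsR L 0 GRADE_ORDER_B := foldl_stepB L none
  have hGO : GRADE_ORDER = GRADE_ORDER_B := rfl
  have hgs : gradeScan L GRADE_ORDER = (gsR L 0 GRADE_ORDER_B).map (·.2) := by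
    rw [hGO]; exact gradeScan_eq_gsR L GRADE_ORDER_B 0
  rw [crLoop_eq, hfold, credit_eq L hc]
  cases hR : gsR L 0 GRADE_ORDER_B with
  | none =>
    have hCR : innerScan "CR" L = none := by
      simp only [GRADE_ORDER_B, gsR] at hR
      rcases h : innerScan "CR" L with _ | o
      · rfl
      · rw [h] at hR; cases hR
    rw [hCR, hgs, hR]
    rfl
  | some p =>
    rcases p with ⟨r, o⟩
    rcases h : innerScan "CR" L with _ | o'
    · rw [hgs, hR]
      rfl
    · -- CR is the first grade: gsR must have returned exactly (0, o')
      have : gsR L 0 GRADE_ORDER_B = some (0, o') := by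
        simp only [GRADE_ORDER_B, gsR, h]
      rw [hR] at this
      cases this
      rfl

-- ===== VERDICT (by name: the statement is the Claim_ definition above) =====
theorem extract_primary_grade_spec : Claim_equal_extract_primary_grade := by
  intro value _
  show extract_primary_grade value = extract_primary_grade_alt value
  simp only [extract_primary_grade, extract_primary_grade_alt]
  rw [parsed_eq, entries_eq]
  have hc := parsed_cred ((((PySem.Str.split? value ",").getD []).map PySem.Str.strip).filter
    (fun e => !(e == "")))
  exact main_eq (List.map parseB ((((PySem.Str.split? value ",").getD []).map PySem.Str.strip).filter
    (fun e => !(e == "")))) hc
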